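-- pv_equiv track=rewrite | github.com/Akhmedkhanov-Gasan/ai-dev-tool | tool.py | extract_get_routes
-- ===== SOURCE A (Python) =====
-- def extract_get_routes(code: str) -> set[str]:
--     # Collect existing GET routes so the model cannot silently remove API endpoints.
--     routes = set()
--
--     for line in code.splitlines():
--         line = line.strip()
--
--         if line.startswith('@app.get("') and line.endswith('")'):
--             route = line.removeprefix('@app.get("').removesuffix('")')
--             routes.add(route)
--
--     return routes
-- ===== SOURCE B (Python) =====
-- def extract_get_routes(code: str) -> set[str]:
--     # One-pass scanner: assembles lines itself (handling \n, \r and \r\n) instead of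
--     # calling splitlines, and matches the decorator on the stripped line buffer.
--     routes = set()
--     buf = ''
--     i, n = 0, len(code)
--     while i <= n:
--         c = code[i] if i < n else '\n'
--         if c == '\n' or c == '\r':
--             s = buf.strip()
--             if s.startswith('@app.get("') and s.endswith('")'):
--                 routes.add(s[10:].removesuffix('")'))
--             buf = ''
--             if c == '\r' and i + 1 < n and code[i + 1] == '\n':
--                 i += 1
--         else:
--             buf += c
--         i += 1
--     return routes
-- ===== Notes on version B (the rewrite author's own statement) =====
-- stated objective: alternative
-- what changed: Replaces the splitlines loop over library-split lines by a single character-level scan that assembles each line itself (handling \n, \r and \r\n), strips and matches it in place; same O(n) result, traded library calls for an explicit one-pass scanner.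
import Mathlib
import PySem

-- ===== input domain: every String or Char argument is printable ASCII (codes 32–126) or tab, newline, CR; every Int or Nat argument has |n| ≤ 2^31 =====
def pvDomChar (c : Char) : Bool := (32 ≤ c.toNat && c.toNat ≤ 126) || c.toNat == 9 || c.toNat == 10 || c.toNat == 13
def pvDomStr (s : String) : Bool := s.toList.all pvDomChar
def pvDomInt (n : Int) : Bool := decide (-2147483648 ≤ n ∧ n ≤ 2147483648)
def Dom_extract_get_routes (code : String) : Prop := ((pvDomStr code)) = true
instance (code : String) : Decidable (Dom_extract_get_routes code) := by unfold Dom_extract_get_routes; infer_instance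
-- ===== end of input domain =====

-- B replaces the splitlines loop by a one-pass character scanner that assembles and tests the
-- lines itself (objective: alternative).

-- ===== PORT A =====
-- str.removeprefix / str.removesuffix are not in PySem: hand-ported, exact by Python's definition.
def pyRemoveprefix (s p : List Char) : List Char :=
  if PySem.Chars.startswith s p then s.drop p.length else s

def pyRemovesuffix (s p : List Char) : List Char :=
  if PySem.Chars.endswith s p && !p.isEmpty then s.take (s.length - p.length) else s

def aStep (routes : List String) (line : List Char) : List String :=
  let line := PySem.Chars.strip line
  if PySem.Chars.startswith line "@app.get(\"".toList && PySem.Chars.endswith line "\")".toList then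
    PySem.Set.add routes (String.ofList (pyRemovesuffix (pyRemoveprefix line "@app.get(\"".toList) "\")".toList))
  else routes

def extract_get_routes (code : String) : List String :=
  (PySem.Chars.splitlines code.toList).foldl aStep PySem.Set.empty

-- ===== PORT B =====
def altStep (routes : List String) (buf : List Char) : List String :=
  let s := PySem.Chars.strip buf
  if PySem.Chars.startswith s "@app.get(\"".toList && PySem.Chars.endswith s "\")".toList then
    PySem.Set.add routes (String.ofList (pyRemovesuffix (s.drop 10) "\")".toList))
  else routes

def altGo : List Char → List Char → List String → List String
  | [], buf, routes => altStep routes buf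
  | '\r' :: '\n' :: rest, buf, routes => altGo rest [] (altStep routes buf)
  | c :: rest, buf, routes =>
    if c = '\n' || c = '\r' then altGo rest [] (altStep routes buf)
    else altGo rest (buf ++ [c]) routes

def extract_get_routes_alt (code : String) : List String :=
  altGo code.toList [] PySem.Set.empty

-- ===== PRECONDITION & SPEC =====
def Spec_extract_get_routes (code : String) (out : List String) : Prop :=
  out = extract_get_routes_alt code
instance (code : String) (out : List String) : Decidable (Spec_extract_get_routes code out) := by unfold Spec_extract_get_routes; infer_instance

-- ===== CLAIM (what is proved, stated in full; the proofs are below) =====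
def Claim_equal_extract_get_routes : Prop := ∀ (code : String), Dom_extract_get_routes code → Spec_extract_get_routes code (extract_get_routes code)

-- ===== LEMMAS AND PROOFS =====

-- the scanner agrees with a foldl of altStep over splitlines.go, for any break test that
-- behaves like (c == '\n' || c == '\r') on the characters actually scanned
theorem machine (isB : Char → Bool) (cs cur : List Char) (acc : List (List Char)) :
    ∀ r : List String, (∀ c ∈ cs, isB c = (c == '\n' || c == '\r')) →
    altGo cs cur.reverse (acc.reverse.foldl altStep r) = (PySem.Chars.splitlines.go isB cs cur acc).foldl altStep r := by
  induction cs, cur, acc using PySem.Chars.splitlines.go.induct (isB := isB) with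
  | case1 cur acc h =>
      intro r _
      have hc : cur = [] := by simpa using h
      subst hc
      simp [PySem.Chars.splitlines.go, altGo, altStep, PySem.Chars.strip, PySem.Chars.lstrip, PySem.Chars.rstrip, PySem.Chars.startswith]
  | case2 cur acc h =>
      intro r _
      simp [PySem.Chars.splitlines.go, h, altGo]
  | case3 rest cur acc ih =>
      intro r hB
      have h1 : altGo ('\r' :: '\n' :: rest) cur.reverse (List.foldl altStep r acc.reverse)
          = altGo rest [] (altStep (List.foldl altStep r acc.reverse) cur.reverse) := by
        simp [altGo]
      rw [h1]
      have h2 := ih (r := r) (fun c hc => hB c (by simp [hc]))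
      simpa using h2
  | case4 c rest cur acc hne hb ih =>
      intro r hB
      have hc : c = '\n' ∨ c = '\r' := by
        have hx := hB c (by simp)
        rw [hb] at hx
        rcases Bool.or_eq_true_iff.mp hx.symm with h | h
        · left; exact (beq_iff_eq.mp h)
        · right; exact (beq_iff_eq.mp h)
      have h1 : altGo (c :: rest) cur.reverse (List.foldl altStep r acc.reverse)
          = altGo rest [] (altStep (List.foldl altStep r acc.reverse) cur.reverse) := by
        rcases hc with h | h <;> subst h
        · cases rest with
          | nil => simp [altGo]
          | cons d t => simp [altGo]
        · cases rest with
          | nil => simp [altGo]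
          | cons d t => simp [altGo]
      have h2 : PySem.Chars.splitlines.go isB (c :: rest) cur acc
          = PySem.Chars.splitlines.go isB rest [] (cur.reverse :: acc) := by
        rcases hc with h | h <;> subst h
        · simp [PySem.Chars.splitlines.go, hb]
        · cases rest with
          | nil => simp [PySem.Chars.splitlines.go, hb]
          | cons d t =>
            rw [PySem.Chars.splitlines.go.eq_def]
            simp [hb]
      rw [h1, h2]
      have h3 := ih (r := r) (fun c hc => hB c (by simp [hc]))
      simpa [List.foldl_append] using h3
  | case5 c rest cur acc hne hb ih =>
      intro r hB
      have hc : ¬ (c = '\n' ∨ c = '\r') := by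
        have hx := hB c (by simp)
        rw [hx] at hb
        intro h
        rcases h with h | h <;> simp [h] at hb
      have hc1 : c ≠ '\n' := fun h => hc (Or.inl h)
      have hc2 : c ≠ '\r' := fun h => hc (Or.inr h)
      have h1 : altGo (c :: rest) cur.reverse (List.foldl altStep r acc.reverse)
          = altGo rest (cur.reverse ++ [c]) (List.foldl altStep r acc.reverse) := by
        cases rest with
        | nil => simp [altGo, hc1, hc2]
        | cons d t => simp [altGo, hc1, hc2]
      have h2 : PySem.Chars.splitlines.go isB (c :: rest) cur acc
          = PySem.Chars.splitlines.go isB rest (c :: cur) acc := by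
        cases rest with
        | nil => simp [PySem.Chars.splitlines.go, hb]
        | cons d t =>
          rw [PySem.Chars.splitlines.go.eq_def]
          simp [hb]
      rw [h1, h2]
      have h3 := ih (r := r) (fun c hc => hB c (by simp [hc]))
      simpa using h3

-- the per-line bodies of A and B agree on every line
theorem step_eq (r : List String) (l : List Char) : aStep r l = altStep r l := by
  show (if PySem.Chars.startswith (PySem.Chars.strip l) "@app.get(\"".toList && PySem.Chars.endswith (PySem.Chars.strip l) "\")".toList then
      PySem.Set.add r (String.ofList (pyRemovesuffix (pyRemoveprefix (PySem.Chars.strip l) "@app.get(\"".toList) "\")".toList))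
    else r)
    = (if PySem.Chars.startswith (PySem.Chars.strip l) "@app.get(\"".toList && PySem.Chars.endswith (PySem.Chars.strip l) "\")".toList then
      PySem.Set.add r (String.ofList (pyRemovesuffix ((PySem.Chars.strip l).drop 10) "\")".toList))
    else r)
  by_cases hb : (PySem.Chars.startswith (PySem.Chars.strip l) "@app.get(\"".toList && PySem.Chars.endswith (PySem.Chars.strip l) "\")".toList) = true
  · rw [if_pos hb, if_pos hb]
    have hsw : PySem.Chars.startswith (PySem.Chars.strip l) "@app.get(\"".toList = true :=
      (Bool.and_eq_true _ _).mp hb |>.1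
    have e1 : pyRemoveprefix (PySem.Chars.strip l) "@app.get(\"".toList = (PySem.Chars.strip l).drop 10 := by
      unfold pyRemoveprefix
      rw [hsw, if_pos rfl]
      rfl
    rw [e1]
  · rw [if_neg hb, if_neg hb]

theorem dom_break (c : Char) (hd : pvDomChar c = true) :
    (decide (c.toNat = 10) || decide (c.toNat = 13) || decide (c.toNat = 11) || decide (c.toNat = 12) ||
     decide (c.toNat = 28) || decide (c.toNat = 29) || decide (c.toNat = 30) || decide (c.toNat = 133) ||
     decide (c.toNat = 8232) || decide (c.toNat = 8233)) = (c == '\n' || c == '\r') := by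
  have hn : (32 ≤ c.toNat ∧ c.toNat ≤ 126) ∨ c.toNat = 9 ∨ c.toNat = 10 ∨ c.toNat = 13 := by
    have hx := hd
    simp only [pvDomChar, Bool.or_eq_true, Bool.and_eq_true, decide_eq_true_eq, beq_iff_eq] at hx
    tauto
  have e10 : (c == '\n') = decide (c.toNat = 10) := by
    by_cases h : c.toNat = 10
    · have hcc : c = '\n' := by rw [← Char.ofNat_toNat c, h]
      simp [hcc, h]
    · have hcc : c ≠ '\n' := fun he => h (by rw [he]; rfl)
      simp [hcc, h]
  have e13 : (c == '\r') = decide (c.toNat = 13) := by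
    by_cases h : c.toNat = 13
    · have hcc : c = '\r' := by rw [← Char.ofNat_toNat c, h]
      simp [hcc, h]
    · have hcc : c ≠ '\r' := fun he => h (by rw [he]; rfl)
      simp [hcc, h]
  rw [e10, e13, Bool.eq_iff_iff]
  simp only [Bool.or_eq_true, decide_eq_true_eq]
  omega

theorem alt_as_foldl (code : String) (hdom : Dom_extract_get_routes code) :
    extract_get_routes_alt code = (PySem.Chars.splitlines code.toList).foldl altStep PySem.Set.empty := by
  have hB : ∀ c ∈ code.toList,
      (decide (c.toNat = 10) || decide (c.toNat = 13) || decide (c.toNat = 11) || decide (c.toNat = 12) ||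
       decide (c.toNat = 28) || decide (c.toNat = 29) || decide (c.toNat = 30) || decide (c.toNat = 133) ||
       decide (c.toNat = 8232) || decide (c.toNat = 8233)) = (c == '\n' || c == '\r') := by
    intro c hc
    apply dom_break
    have := hdom
    unfold Dom_extract_get_routes pvDomStr at this
    exact List.all_eq_true.mp this c hc
  exact machine _ code.toList [] [] PySem.Set.empty hB

-- ===== VERDICT =====
theorem extract_get_routes_spec : Claim_equal_extract_get_routes := by
  intro code hdom
  show extract_get_routes code = extract_get_routes_alt code
  rw [alt_as_foldl code hdom]
  apply PySem.List.foldl_congr_mem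
  intro acc l _
  exact step_eq acc l
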